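-- pv_equiv track=rewrite | github.com/mr-mvm/python-development-portfilio | VideoBatchAssembler/sequence_generator.py | endcaps_middle
-- ===== SOURCE A (Python) =====
-- def endcaps_middle(lst):
--     left, right = 0, len(lst) - 1
--     order = []
--     while left < right:
--         order.append(lst[left]); order.append(lst[right])
--         left += 1; right -= 1
--     if left == right:
--         order.append(lst[left])
--     return order
-- ===== SOURCE B (Python) =====
-- def endcaps_middle(lst):
--     order = [v for pair in zip(lst, reversed(lst)) for v in pair]
--     return order[:len(lst)]
-- ===== Notes on version B (the rewrite author's own statement) =====
-- stated objective: idiomatic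
-- what changed: Replaces the two-pointer while loop with parity/middle special cases by zipping the list with its reversal, flattening the pairs, and slicing to the original length.
import Mathlib
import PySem

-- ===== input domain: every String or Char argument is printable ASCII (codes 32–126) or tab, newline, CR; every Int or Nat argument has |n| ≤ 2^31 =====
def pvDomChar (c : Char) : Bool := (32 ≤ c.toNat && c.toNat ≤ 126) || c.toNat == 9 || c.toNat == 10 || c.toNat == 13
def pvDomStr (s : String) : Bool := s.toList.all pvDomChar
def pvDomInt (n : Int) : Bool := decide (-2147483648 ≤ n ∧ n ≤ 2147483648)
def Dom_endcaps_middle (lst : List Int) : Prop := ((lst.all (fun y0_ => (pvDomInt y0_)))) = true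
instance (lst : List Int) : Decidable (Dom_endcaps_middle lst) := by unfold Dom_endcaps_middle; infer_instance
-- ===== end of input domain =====

-- B builds the interleaving by zipping the list with its reversal and slicing to length (idiomatic), instead of A's two-pointer loop with a middle-element branch.


-- ===== PORT A =====
-- while loop of A: recursion on the shrinking gap right-left; lst[i] at an
-- in-range nonnegative index, ported via PySem.List.pyGet? (never none here).
def endcapsLoop (lst : List Int) (left right : Int) (order : List Int) : List Int :=
  if left < right then
    endcapsLoop lst (left + 1) (right - 1)
      (order ++ [(PySem.List.pyGet? lst left).getD 0, (PySem.List.pyGet? lst right).getD 0])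
  else if left = right then order ++ [(PySem.List.pyGet? lst left).getD 0]
  else order
termination_by (right - left).toNat
decreasing_by omega

def endcaps_middle (lst : List Int) : List Int :=
  endcapsLoop lst 0 ((lst.length : Int) - 1) []

-- ===== PORT B =====
def endcaps_middle_alt (lst : List Int) : List Int :=
  ((lst.zip lst.reverse).flatMap (fun p => [p.1, p.2])).take lst.length

-- ===== PRECONDITION & SPEC =====
def Spec_endcaps_middle (lst : List Int) (out : List Int) : Prop := out = endcaps_middle_alt lst
instance (lst : List Int) (out : List Int) : Decidable (Spec_endcaps_middle lst out) := by unfold Spec_endcaps_middle; infer_instance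

-- ===== CLAIM (what is proved, stated in full; the proofs are below) =====
def Claim_equal_endcaps_middle : Prop := ∀ (lst : List Int), Dom_endcaps_middle lst → Spec_endcaps_middle lst (endcaps_middle lst)

-- ===== LEMMAS AND PROOFS =====

-- closed form both ports compute: head, last, then recurse on the interior
def midForm : List Int → List Int
  | [] => []
  | [x] => [x]
  | x :: y :: xs =>
      x :: (y :: xs).getLast (by simp) :: midForm ((y :: xs).dropLast)
termination_by l => l.length
decreasing_by simp

theorem midForm_concat (x z : Int) (ys : List Int) :
    midForm (x :: ys ++ [z]) = x :: z :: midForm ys := by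
  cases ys with
  | nil =>
      show midForm (x :: z :: []) = _
      rw [midForm.eq_def]
      simp [midForm]
  | cons w ws =>
      show midForm (x :: (w :: (ws ++ [z]))) = _
      rw [midForm.eq_def]
      simp
      rw [show w :: (ws ++ [z]) = (w :: ws) ++ [z] from rfl, List.dropLast_concat]

-- both-ends induction principle
theorem bidir_ind (P : List Int → Prop) (h0 : P []) (h1 : ∀ x, P [x])
    (h2 : ∀ x z ys, P ys → P (x :: ys ++ [z])) : ∀ l, P l := by
  intro l
  induction hn : l.length using Nat.strong_induction_on generalizing l with
  | _ n ih =>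
    match l with
    | [] => exact h0
    | [x] => exact h1 x
    | x :: y :: xs =>
        have hx : x :: y :: xs
            = x :: ((y :: xs).dropLast ++ [(y :: xs).getLast (by simp)]) := by
          rw [List.dropLast_append_getLast]
        rw [hx]
        apply h2
        apply ih ((y :: xs).dropLast).length _ _ rfl
        subst hn
        simp

theorem midForm_nil : midForm [] = [] := by rw [midForm.eq_def]

theorem midForm_single (x : Int) : midForm [x] = [x] := by rw [midForm.eq_def]

theorem pyGet_pre_seg (pre post : List Int) (x : Int) :
    (PySem.List.pyGet? (pre ++ x :: post) (pre.length : Int)).getD 0 = x := by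
  simp [PySem.List.pyGet?, PySem.List.pyIdx?]

theorem loop_seg : ∀ (seg pre post order : List Int),
    endcapsLoop (pre ++ seg ++ post) (pre.length : Int)
      ((pre.length : Int) + (seg.length : Int) - 1) order = order ++ midForm seg := by
  refine bidir_ind _ ?_ ?_ ?_
  · intro pre post order
    rw [endcapsLoop]
    rw [if_neg (by simp), if_neg (by simp; omega)]
    simp [midForm_nil]
  · intro x pre post order
    rw [endcapsLoop]
    rw [if_neg (by simp), if_pos (by simp)]
    have h := pyGet_pre_seg pre post x
    rw [show pre ++ [x] ++ post = pre ++ x :: post by simp, h, midForm_single]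
  · intro x z ys ih pre post order
    rw [endcapsLoop]
    have hlen : ((x :: ys ++ [z]).length : Int) = (ys.length : Int) + 2 := by
      simp; omega
    rw [hlen, if_pos (by omega)]
    have hget1 : (PySem.List.pyGet? (pre ++ (x :: ys ++ [z]) ++ post)
        (pre.length : Int)).getD 0 = x := by
      have h := pyGet_pre_seg pre ((ys ++ [z]) ++ post) x
      rw [show pre ++ x :: ((ys ++ [z]) ++ post) = pre ++ (x :: ys ++ [z]) ++ post by simp] at h
      exact h
    have hget2 : (PySem.List.pyGet? (pre ++ (x :: ys ++ [z]) ++ post)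
        ((pre.length : Int) + ((ys.length : Int) + 2) - 1)).getD 0 = z := by
      have h := pyGet_pre_seg (pre ++ x :: ys) post z
      rw [show (pre ++ x :: ys) ++ z :: post = pre ++ (x :: ys ++ [z]) ++ post by simp] at h
      rw [show (((pre ++ x :: ys).length : Int)) = (pre.length : Int) + ((ys.length : Int) + 2) - 1 by
        simp; omega] at h
      exact h
    rw [hget1, hget2]
    have harr2 : pre ++ (x :: ys ++ [z]) ++ post = (pre ++ [x]) ++ ys ++ ([z] ++ post) := by simp
    have hidx1 : (pre.length : Int) + 1 = (((pre ++ [x]).length : Int)) := by simp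
    have hidx2 : (pre.length : Int) + ((ys.length : Int) + 2) - 1 - 1
        = (((pre ++ [x]).length : Int)) + (ys.length : Int) - 1 := by simp; omega
    rw [harr2, hidx1, hidx2, ih (pre ++ [x]) ([z] ++ post)]
    rw [midForm_concat]
    simp

theorem portA_eq_midForm (lst : List Int) : endcaps_middle lst = midForm lst := by
  have h := loop_seg lst [] [] []
  simpa [endcaps_middle] using h

theorem flatMap_pair_length (l : List (Int × Int)) :
    (l.flatMap (fun p => [p.1, p.2])).length = 2 * l.length := by
  induction l with
  | nil => rfl
  | cons a t iht => simp [List.flatMap_cons, iht]; omega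

theorem portB_eq_midForm (lst : List Int) : endcaps_middle_alt lst = midForm lst := by
  induction lst using bidir_ind with
  | h0 => simp [endcaps_middle_alt, midForm_nil]
  | h1 x => simp [endcaps_middle_alt, midForm_single]
  | h2 x z ys ih =>
      unfold endcaps_middle_alt at ih ⊢
      have hrev : (x :: ys ++ [z]).reverse = z :: ys.reverse ++ [x] := by simp
      rw [hrev]
      have hzip : (x :: ys ++ [z]).zip (z :: ys.reverse ++ [x])
          = (x, z) :: ((ys.zip ys.reverse) ++ [(z, x)]) := by
        show ((x :: ys) ++ [z]).zip ((z :: ys.reverse) ++ [x]) = _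
        rw [List.zip_append (by simp)]
        simp [List.zip]
      rw [hzip, midForm_concat, ← ih]
      rw [show List.flatMap (fun p => ([p.1, p.2] : List Int))
            ((x, z) :: ((ys.zip ys.reverse) ++ [(z, x)]))
          = x :: z :: (((ys.zip ys.reverse).flatMap (fun p => [p.1, p.2])) ++ [z, x]) by
        simp [List.flatMap_cons, List.flatMap_append]]
      rw [show (x :: ys ++ [z]).length = ys.length + 2 by simp]
      rw [show ys.length + 2 = (ys.length + 1) + 1 from rfl]
      rw [List.take_succ_cons, List.take_succ_cons]
      rw [List.take_append_of_le_length
        (by rw [flatMap_pair_length, List.length_zip]; simp; omega)]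

-- ===== VERDICT (by name: the statement is the Claim_ definition above) =====
theorem endcaps_middle_spec : Claim_equal_endcaps_middle := by
  intro lst _
  unfold Spec_endcaps_middle
  rw [portA_eq_midForm, portB_eq_midForm]
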